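-- pv_equiv track=rewrite | github.com/Nicolnegg/ProyectoTeoinfo | interfaz.py | texto_notas
-- ===== SOURCE A (Python) =====
-- def texto_notas(notas):
--     # Variable para realizar el seguimiento del contador
--     contador = 0
--
--     # Lista para almacenar los elementos con saltos de línea
--     elementos_con_saltos = []
--
--     # Recorrer la lista
--     for elemento in notas:
--         # Agregar el elemento al string
--         elementos_con_saltos.append(elemento)
--
--         # Incrementar el contador
--         contador += 1
--
--         # Verificar si se han procesado 6 elementos
--         if contador % 6 == 0:
--             # Agregar un salto de línea al string
--             elementos_con_saltos.append("\n")
--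
--     # Convertir la lista en un solo string separado por espacios
--     resultado = " ".join(elementos_con_saltos)
--     return(resultado)
-- ===== SOURCE B (Python) =====
-- def texto_notas(notas):
--     tokens = []
--     for i in range(0, len(notas), 6):
--         chunk = notas[i:i+6]
--         tokens.extend(chunk)
--         if len(chunk) == 6:
--             tokens.append("\n")
--     return " ".join(tokens)
-- ===== Notes on version B (the rewrite author's own statement) =====
-- stated objective: alternative
-- what changed: B replaces A's element-by-element loop with a modulo-6 counter by slicing notas into chunks of 6 and appending a newline token only after full chunks (preserving the trailing newline on exact multiples of 6).
import Mathlib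
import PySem

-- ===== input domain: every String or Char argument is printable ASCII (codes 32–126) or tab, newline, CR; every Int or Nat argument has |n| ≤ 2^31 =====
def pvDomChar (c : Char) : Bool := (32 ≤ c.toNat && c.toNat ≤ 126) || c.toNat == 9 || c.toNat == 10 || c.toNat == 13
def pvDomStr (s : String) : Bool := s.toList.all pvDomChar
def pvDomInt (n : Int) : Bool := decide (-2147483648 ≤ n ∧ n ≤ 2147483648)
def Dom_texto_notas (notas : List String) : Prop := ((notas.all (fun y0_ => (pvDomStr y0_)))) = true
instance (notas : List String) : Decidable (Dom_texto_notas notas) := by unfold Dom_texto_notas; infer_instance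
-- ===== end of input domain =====

-- ===== PORT A =====
-- literal port of A: fold over notas carrying (contador, elementos_con_saltos), then " ".join
def stepA (st : Nat × List String) (elemento : String) : Nat × List String :=
  let elems := st.2 ++ [elemento]
  let contador := st.1 + 1
  if contador % 6 == 0 then (contador, elems ++ ["\n"]) else (contador, elems)

def texto_notas (notas : List String) : String :=
  let st := notas.foldl stepA (0, [])
  PySem.Str.join " " st.2

-- ===== PORT B =====
-- literal port of B: loop over chunks notas[i:i+6] (take/drop is exact for these nonnegative slices),
-- extend with the chunk, append "\n" only after a full chunk
def altTokens (l : List String) : List String :=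
  if l = [] then []
  else
    let chunk := l.take 6
    (chunk ++ (if chunk.length == 6 then ["\n"] else [])) ++ altTokens (l.drop 6)
termination_by l.length
decreasing_by
  have hp : 0 < l.length := List.length_pos_of_ne_nil (by assumption)
  simp [List.length_drop]; omega

def texto_notas_alt (notas : List String) : String :=
  PySem.Str.join " " (altTokens notas)

-- ===== PRECONDITION & SPEC =====
def Spec_texto_notas (notas : List String) (out : String) : Prop := out = texto_notas_alt notas
instance (notas : List String) (out : String) : Decidable (Spec_texto_notas notas out) := by unfold Spec_texto_notas; infer_instance

-- ===== CLAIM (what is proved, stated in full; the proofs are below) =====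
def Claim_equal_texto_notas : Prop := ∀ (notas : List String), Dom_texto_notas notas → Spec_texto_notas notas (texto_notas notas)

-- ===== LEMMAS AND PROOFS =====

-- ===== VERDICT (by name: the statement is the Claim_ definition above) =====
-- A's token list as a recursion on the list with the running counter
def tokA (c : Nat) : List String → List String
  | [] => []
  | x :: xs => if (c + 1) % 6 == 0 then x :: "\n" :: tokA (c + 1) xs else x :: tokA (c + 1) xs

theorem foldA_eq_tokA (l : List String) (c : Nat) (acc : List String) :
    (l.foldl stepA (c, acc)).2 = acc ++ tokA c l := by
  induction l generalizing c acc with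
  | nil => simp [tokA]
  | cons x xs ih =>
    simp only [List.foldl_cons, tokA]
    by_cases h : (c + 1) % 6 = 0
    · rw [show stepA (c, acc) x = (c + 1, acc ++ [x] ++ ["\n"]) from by simp [stepA, h]]
      simp [h, ih]
    · rw [show stepA (c, acc) x = (c + 1, acc ++ [x]) from by simp [stepA, h]]
      simp [h, ih]

theorem tokA_add6 (l : List String) (c : Nat) : tokA (c + 6) l = tokA c l := by
  induction l generalizing c with
  | nil => rfl
  | cons x xs ih =>
    have h : (c + 6 + 1) % 6 = (c + 1) % 6 := by omega
    simp only [tokA, h]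
    rw [show c + 6 + 1 = (c + 1) + 6 by omega, ih]

theorem altTokens_nil : altTokens [] = [] := by rw [altTokens]; rfl

theorem tokA_zero_eq_alt (l : List String) : tokA 0 l = altTokens l := by
  match l with
  | [] => rw [altTokens]; rfl
  | [a] => rw [altTokens]; simp [tokA, altTokens_nil]
  | [a, b] => rw [altTokens]; simp [tokA, altTokens_nil]
  | [a, b, c] => rw [altTokens]; simp [tokA, altTokens_nil]
  | [a, b, c, d] => rw [altTokens]; simp [tokA, altTokens_nil]
  | [a, b, c, d, e] => rw [altTokens]; simp [tokA, altTokens_nil]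
  | a :: b :: c :: d :: e :: f :: rest =>
    have ih := tokA_zero_eq_alt rest
    have h6 : tokA 6 rest = tokA 0 rest := tokA_add6 rest 0
    rw [altTokens]
    simp only [tokA]
    norm_num [h6, ih]
    simp
termination_by l.length

theorem texto_notas_spec : Claim_equal_texto_notas := by
  intro notas _
  unfold Spec_texto_notas texto_notas texto_notas_alt
  show PySem.Str.join " " (List.foldl stepA ((0:Nat), ([]:List String)) notas).2 = _
  rw [foldA_eq_tokA, tokA_zero_eq_alt]
  rfl
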